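-- pv_equiv track=rewrite | github.com/key-moon/golf | deflate_optimizer/__init__.py | _length_to_code_and_extra_for_dump
-- ===== SOURCE A (Python) =====
-- from typing import List, Tuple, Dict, Optional, Callable
--
-- LEN_BASES = [
--     3,4,5,6,7,8,9,10,11,13,15,17,19,23,27,31,
--     35,43,51,59,67,83,99,115,131,163,195,227,258
-- ]
--
-- LEN_EXTRA = [
--     0,0,0,0,0,0,0,0,1,1,1,1,2,2,2,2,
--     3,3,3,3,4,4,4,4,5,5,5,5,0
-- ]
--
-- def _length_to_code_and_extra_for_dump(length: int) -> Tuple[int,int,int]: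
--     if length < 3 or length > 258:
--         raise ValueError("length out of range")
--     if length == 258:
--         return 285, 0, 0
--     for i in range(len(LEN_BASES)-1):
--         base = LEN_BASES[i]; nextb = LEN_BASES[i+1]
--         if base <= length < nextb:
--             return 257 + i, length - base, LEN_EXTRA[i]
--     return 285, 0, 0
-- ===== SOURCE B (Python) =====
-- from typing import Tuple
--
-- LEN_BASES = [
--     3,4,5,6,7,8,9,10,11,13,15,17,19,23,27,31,
--     35,43,51,59,67,83,99,115,131,163,195,227,258
-- ]
--
-- LEN_EXTRA = [
--     0,0,0,0,0,0,0,0,1,1,1,1,2,2,2,2,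
--     3,3,3,3,4,4,4,4,5,5,5,5,0
-- ]
--
-- def _bisect_right(a, x, lo, hi):
--     while lo < hi:
--         mid = (lo + hi) // 2
--         if x < a[mid]:
--             hi = mid
--         else:
--             lo = mid + 1
--     return lo
--
-- def _length_to_code_and_extra_for_dump(length: int) -> Tuple[int, int, int]:
--     if length < 3 or length > 258:
--         raise ValueError("length out of range")
--     i = _bisect_right(LEN_BASES, length, 0, len(LEN_BASES)) - 1
--     return 257 + i, length - LEN_BASES[i], LEN_EXTRA[i]
-- ===== Notes on version B (the rewrite author's own statement) =====
-- stated objective: alternative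
-- what changed: Replaces the linear scan over adjacent base pairs (plus a special-cased 258 branch and a trailing fallback) with a single binary search (bisect_right) over LEN_BASES that yields the code index directly.
import Mathlib
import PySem

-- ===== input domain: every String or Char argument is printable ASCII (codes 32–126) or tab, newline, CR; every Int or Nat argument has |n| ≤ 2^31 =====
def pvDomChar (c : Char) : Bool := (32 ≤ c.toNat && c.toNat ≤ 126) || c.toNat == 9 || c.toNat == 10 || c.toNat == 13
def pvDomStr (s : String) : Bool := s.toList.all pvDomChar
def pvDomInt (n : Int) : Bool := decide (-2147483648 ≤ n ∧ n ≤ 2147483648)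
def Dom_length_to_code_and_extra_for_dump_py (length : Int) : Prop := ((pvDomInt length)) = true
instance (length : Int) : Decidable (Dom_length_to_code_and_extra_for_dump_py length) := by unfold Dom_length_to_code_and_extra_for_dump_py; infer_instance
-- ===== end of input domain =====

-- B replaces A's linear scan over adjacent base pairs (and its special 258 branch and
-- trailing fallback) with one binary search over LEN_BASES; same results on 3..258.

def pvLenBases : List Int := [
    3,4,5,6,7,8,9,10,11,13,15,17,19,23,27,31,
    35,43,51,59,67,83,99,115,131,163,195,227,258]

def pvLenExtra : List Int := [
    0,0,0,0,0,0,0,0,1,1,1,1,2,2,2,2,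
    3,3,3,3,4,4,4,4,5,5,5,5,0]

-- ===== PORT A =====
-- A's 'for i in range(len(LEN_BASES)-1)' with first-return semantics; all indices
-- are in range (0..28 into a 29-element list) so .getD 0 is exact here.
def pvALoop (length : Int) : List Int → Option (Int × Int × Int)
  | [] => none
  | i :: rest =>
      let base := (PySem.List.pyGet? pvLenBases i).getD 0
      let nextb := (PySem.List.pyGet? pvLenBases (i + 1)).getD 0
      if base ≤ length ∧ length < nextb then
        some (257 + i, length - base, (PySem.List.pyGet? pvLenExtra i).getD 0)
      else pvALoop length rest

def length_to_code_and_extra_for_dump_py (length : Int) : Int × Int × Int :=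
  -- the 'length < 3 or length > 258: raise ValueError' path is excluded by Pre_
  if length = 258 then (285, 0, 0)
  else
    match pvALoop length (PySem.List.pyRange 0 28 1) with
    | some r => r
    | none => (285, 0, 0)

-- ===== PORT B =====
-- Source B's hand-written bisect_right (while lo < hi binary search)
-- structural fuel (= hi - lo at the call) so the kernel can reduce it; the
-- 'lo < hi' test and the halving are exactly Source B's while-loop
def pvBRGo (a : List Int) (x : Int) : Nat → Nat → Nat → Nat
  | 0, lo, _ => lo
  | fuel + 1, lo, hi =>
      if lo < hi then
        let mid := (lo + hi) / 2
        if x < (PySem.List.pyGet? a (mid : Int)).getD 0 then pvBRGo a x fuel lo mid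
        else pvBRGo a x fuel (mid + 1) hi
      else lo

def pvBisectRight (a : List Int) (x : Int) (lo hi : Nat) : Nat := pvBRGo a x (hi - lo) lo hi

def length_to_code_and_extra_for_dump_py_alt (length : Int) : Int × Int × Int :=
  -- the raise path is excluded by Pre_
  let i : Int := (pvBisectRight pvLenBases length 0 29 : Int) - 1
  (257 + i, length - (PySem.List.pyGet? pvLenBases i).getD 0,
   (PySem.List.pyGet? pvLenExtra i).getD 0)

-- ===== PRECONDITION & SPEC =====
-- Pre_ excludes exactly the inputs on which A raises ValueError.
def Pre_length_to_code_and_extra_for_dump_py (length : Int) : Prop := 3 ≤ length ∧ length ≤ 258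
instance (length : Int) : Decidable (Pre_length_to_code_and_extra_for_dump_py length) := by unfold Pre_length_to_code_and_extra_for_dump_py; infer_instance
def pvWitness_length_to_code_and_extra_for_dump_py : Int := 17

def Spec_length_to_code_and_extra_for_dump_py (length : Int) (out : Int × Int × Int) : Prop := out = length_to_code_and_extra_for_dump_py_alt length
instance (length : Int) (out : Int × Int × Int) : Decidable (Spec_length_to_code_and_extra_for_dump_py length out) := by unfold Spec_length_to_code_and_extra_for_dump_py; infer_instance

-- ===== CLAIM (what is proved, stated in full; the proofs are below) =====
def Claim_equal_length_to_code_and_extra_for_dump_py : Prop := ∀ (length : Int), Dom_length_to_code_and_extra_for_dump_py length → Pre_length_to_code_and_extra_for_dump_py length → Spec_length_to_code_and_extra_for_dump_py length (length_to_code_and_extra_for_dump_py length)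

-- ===== LEMMAS AND PROOFS =====
set_option maxRecDepth 4000 in
theorem pv_agree_on_range : ∀ n : Nat, n < 256 →
    length_to_code_and_extra_for_dump_py (3 + (n : Int)) =
    length_to_code_and_extra_for_dump_py_alt (3 + (n : Int)) := by decide

-- ===== VERDICT (by name: the statement is the Claim_ definition above) =====
theorem length_to_code_and_extra_for_dump_py_spec : Claim_equal_length_to_code_and_extra_for_dump_py := by
  intro length _ hpre
  unfold Spec_length_to_code_and_extra_for_dump_py
  obtain ⟨h1, h2⟩ := hpre
  have hrep : length = 3 + ((length - 3).toNat : Int) := by omega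
  rw [hrep]
  exact pv_agree_on_range _ (by omega)
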